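-- pv_equiv track=rewrite | github.com/Eric-Kadyrov/PYTHON | cats_with_hats.py | cats_with_hats
-- ===== SOURCE A (Python) =====
-- def cats_with_hats(num_rounds, num_cats):
--     # Create an array to represent the state of hats on cats
--     hats = [False] * num_cats
--
--     # Perform the given number of rounds
--     for round in range(1, num_rounds + 1):
--         # Toggle every k-th cat based on the current round
--         for cat in range(round, num_cats + 1, round):
--             hats[cat - 1] = not hats[cat - 1]
--
--     # Determine which cats have hats at the end
--     cats_with_hats = []
--     for cat_index in range(num_cats):
--         if hats[cat_index]:
--             cats_with_hats.append(cat_index + 1)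
--
--     return cats_with_hats
-- ===== SOURCE B (Python) =====
-- def cats_with_hats(num_rounds, num_cats):
--     # Per-cat divisor-parity: cat c ends with a hat iff it has an odd number
--     # of divisors d <= num_rounds; divisors are enumerated in sqrt pairs.
--     # Both members of the pair (i, cat // i) are >= i, so once i exceeds
--     # num_rounds no further divisor can be counted and the loop stops.
--     result = []
--     for cat in range(1, num_cats + 1):
--         count = 0
--         i = 1
--         while i * i <= cat and i <= num_rounds:
--             if cat % i == 0:
--                 count += 1
--                 partner = cat // i
--                 if partner != i and partner <= num_rounds:
--                     count += 1
--             i += 1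
--         if count % 2 == 1:
--             result.append(cat)
--     return result
-- ===== Notes on version B (the rewrite author's own statement) =====
-- stated objective: alternative
-- what changed: Replaces the shared hats array and the per-round toggling sieve by a per-cat divisor-parity computation: each cat's divisors are enumerated in sqrt pairs (i, cat//i), counted only if they are <= num_rounds, with the scan stopping once i exceeds num_rounds; the cat is output iff that count is odd.
import Mathlib
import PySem

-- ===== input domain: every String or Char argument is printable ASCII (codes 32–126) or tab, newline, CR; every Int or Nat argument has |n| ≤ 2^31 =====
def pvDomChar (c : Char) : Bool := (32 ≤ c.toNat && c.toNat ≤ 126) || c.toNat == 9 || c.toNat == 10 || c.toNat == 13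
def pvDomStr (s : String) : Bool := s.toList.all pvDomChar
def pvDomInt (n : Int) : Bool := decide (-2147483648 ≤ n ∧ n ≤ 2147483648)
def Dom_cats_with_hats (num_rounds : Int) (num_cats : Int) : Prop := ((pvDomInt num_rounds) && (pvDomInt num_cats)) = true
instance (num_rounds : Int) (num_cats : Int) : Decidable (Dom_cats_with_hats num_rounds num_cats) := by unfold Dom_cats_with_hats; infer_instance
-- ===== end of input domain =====

-- B replaces A's shared hats array and per-round toggling sieve by a per-cat
-- divisor-parity count over sqrt pairs (alternative algorithm, no speed claim).

-- ===== PORT A =====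
-- hats[cat - 1] = not hats[cat - 1]; the index is always in range here (1 ≤ cat ≤ num_cats)
def pvToggle (h : List Bool) (cat : Int) : List Bool :=
  PySem.List.pySetD h (cat - 1) (! PySem.List.pyGetD h (cat - 1) false)

def cats_with_hats (num_rounds : Int) (num_cats : Int) : List Int :=
  -- hats = [False] * num_cats
  let hats0 : List Bool := List.replicate num_cats.toNat false
  -- for round in range(1, num_rounds + 1): for cat in range(round, num_cats + 1, round): toggle
  let hats :=
    (PySem.List.pyRange 1 (num_rounds + 1) 1).foldl
      (fun h round => (PySem.List.pyRange round (num_cats + 1) round).foldl pvToggle h) hats0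
  -- for cat_index in range(num_cats): if hats[cat_index]: append cat_index + 1
  (PySem.List.pyRange 0 num_cats 1).foldl
    (fun acc catIndex => if PySem.List.pyGetD hats catIndex false then acc ++ [catIndex + 1] else acc) []

-- ===== PORT B =====
-- the 'while i * i <= cat' loop of Source B, accumulating count
def pvDivLoop (num_rounds : Int) (cat : Int) (i : Int) (count : Int) : Int :=
  if i * i ≤ cat ∧ i ≤ num_rounds then
    pvDivLoop num_rounds cat (i + 1)
      (count +
        (if PySem.Int.mod cat i = 0 then
          1 +
          (if PySem.Int.floordiv cat i ≠ i ∧ PySem.Int.floordiv cat i ≤ num_rounds then 1 else 0)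
        else 0))
  else count
termination_by (cat + 1 - i).toNat
decreasing_by
  rename_i hcond
  rcases Int.lt_or_le 0 i with hi | hi
  · have h1 : i ≤ i * i := le_mul_of_one_le_left (by omega) (by omega)
    have h2 : i ≤ cat := le_trans h1 hcond.1
    omega
  · have h0 : 0 ≤ i * i := mul_self_nonneg i
    have h2 : (0:Int) ≤ cat := le_trans h0 hcond.1
    omega

def cats_with_hats_alt (num_rounds : Int) (num_cats : Int) : List Int :=
  (PySem.List.pyRange 1 (num_cats + 1) 1).foldl
    (fun res cat => if PySem.Int.mod (pvDivLoop num_rounds cat 1 0) 2 = 1 then res ++ [cat] else res) []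

-- ===== PRECONDITION & SPEC =====
def Spec_cats_with_hats (num_rounds : Int) (num_cats : Int) (out : List Int) : Prop := out = cats_with_hats_alt num_rounds num_cats
instance (num_rounds : Int) (num_cats : Int) (out : List Int) : Decidable (Spec_cats_with_hats num_rounds num_cats out) := by unfold Spec_cats_with_hats; infer_instance

-- ===== CLAIM (what is proved, stated in full; the proofs are below) =====
def Claim_equal_cats_with_hats : Prop := ∀ (num_rounds : Int) (num_cats : Int), Dom_cats_with_hats num_rounds num_cats → Spec_cats_with_hats num_rounds num_cats (cats_with_hats num_rounds num_cats)

-- ===== LEMMAS AND PROOFS =====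

-- the divisor band: divisors d of c with i ≤ d ≤ c // i and d ≤ r
noncomputable def pvBand (r c i : Int) : Finset Int :=
  (Finset.Icc i (c / i)).filter (fun d => PySem.Int.mod c d = 0 ∧ d ≤ r)

-- the value both programs compute per cat: how many divisors d of c satisfy d ≤ r
noncomputable def pvDivCard (r c : Int) : Nat :=
  ((Finset.Icc 1 c).filter (fun d => PySem.Int.mod c d = 0 ∧ d ≤ r)).card

-- ---- B-side arithmetic helpers ----

lemma pv_e_le (c i d : Int) (hi : 1 ≤ i) (hd1 : 1 ≤ d) (hdvd : d ∣ c) (hle : d ≤ c / i) :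
    i ≤ c / d := by
  have h1 : d * i ≤ c := by
    have := (Int.le_ediv_iff_mul_le (a := d) (b := c) (c := i) (by omega)).mp hle
    linarith
  exact (Int.le_ediv_iff_mul_le (by omega)).mpr (by linarith)

lemma pv_d_eq (c i d : Int) (hi : 1 ≤ i) (hd1 : 1 ≤ d) (hdvd : d ∣ c) (he : c / d = i) :
    d = c / i ∧ i ∣ c := by
  have h2 : c / d * d = c := Int.ediv_mul_cancel hdvd
  have hc : c = d * i := by rw [← he]; linarith
  constructor
  · rw [hc, Int.mul_ediv_cancel _ (by omega)]
  · exact ⟨d, by linarith⟩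

-- the floor c // i, when it happens to divide c and lies at or above i, forces i ∣ c
lemma pv_top_divisor (c i : Int) (hc : 1 ≤ c) (hi : 1 ≤ i) (hdvd : (c / i) ∣ c)
    (hge : i ≤ c / i) : i ∣ c ∧ c / (c / i) = i := by
  set d := c / i with hd
  have hd1 : 1 ≤ d := le_trans hi hge
  have h2 : c / d * d = c := Int.ediv_mul_cancel hdvd
  have hel : i ≤ c / d := pv_e_le c i d hi hd1 hdvd hd.le
  have hub : c < (c / i + 1) * i := Int.lt_ediv_add_one_mul_self c (by omega)
  have heu : c / d ≤ i := by
    by_contra hcon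
    push_neg at hcon
    have h3 : i + 1 ≤ c / d := by omega
    nlinarith
  have he : c / d = i := le_antisymm heu hel
  exact ⟨(pv_d_eq c i d hi hd1 hdvd he).2, he⟩

lemma pv_band_mono (c i : Int) (hc : 0 ≤ c) (hi : 1 ≤ i) : c / (i + 1) ≤ c / i := by
  have h1 : c / (i+1) * (i+1) ≤ c := Int.ediv_mul_le c (by omega)
  have h2 : 0 ≤ c / (i+1) := Int.ediv_nonneg hc (by omega)
  exact (Int.le_ediv_iff_mul_le (by omega)).mpr (by nlinarith)

-- a divisor strictly between i and c // i fits in the next band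
lemma pv_mid_divisor (c i d : Int) (hc : 1 ≤ c) (hi : 1 ≤ i) (hdvd : d ∣ c)
    (hlo : i + 1 ≤ d) (hhi : d ≤ c / i) (hne : d ≠ c / i) : d ≤ c / (i + 1) := by
  have hd1 : 1 ≤ d := by omega
  have hel : i ≤ c / d := pv_e_le c i d hi hd1 hdvd hhi
  have h2 : c / d * d = c := Int.ediv_mul_cancel hdvd
  have hne' : c / d ≠ i := by
    intro he
    exact hne (pv_d_eq c i d hi hd1 hdvd he).1
  have h3 : i + 1 ≤ c / d := by omega
  exact (Int.le_ediv_iff_mul_le (by omega)).mpr (by nlinarith)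

lemma pvBand_step (r c i : Int) (hc : 1 ≤ c) (hi : 1 ≤ i) (hsq : i * i ≤ c) :
    (pvBand r c i).card =
      (if PySem.Int.mod c i = 0 then
        ((if i ≤ r then 1 else 0) + (if c / i ≠ i ∧ c / i ≤ r then 1 else 0))
      else 0) + (pvBand r c (i + 1)).card := by
  have hiq : i ≤ c / i := (Int.le_ediv_iff_mul_le (by omega)).mpr hsq
  have hmono : c / (i + 1) ≤ c / i := pv_band_mono c i (by omega) hi
  -- the removed part of the band
  set T : Finset Int :=
    (Finset.Icc i (c / i)).filter
      (fun d => (PySem.Int.mod c d = 0 ∧ d ≤ r) ∧ (d = i ∨ d = c / i)) with hT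
  have hmemT : ∀ d, d ∈ T ↔
      (i ≤ d ∧ d ≤ c / i) ∧ (PySem.Int.mod c d = 0 ∧ d ≤ r) ∧ (d = i ∨ d = c / i) := by
    intro d; simp [hT, Finset.mem_filter, Finset.mem_Icc]
  have hmemB : ∀ (j : Int) d, d ∈ pvBand r c j ↔
      (j ≤ d ∧ d ≤ c / j) ∧ (PySem.Int.mod c d = 0 ∧ d ≤ r) := by
    intro j d; simp [pvBand, Finset.mem_filter, Finset.mem_Icc]
  have hunion : pvBand r c i = pvBand r c (i + 1) ∪ T := by
    apply Finset.ext
    intro d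
    rw [Finset.mem_union, hmemT d, hmemB i d, hmemB (i+1) d]
    constructor
    · rintro ⟨⟨hlo, hhi⟩, hP⟩
      by_cases hcase : d = i ∨ d = c / i
      · exact Or.inr ⟨⟨hlo, hhi⟩, hP, hcase⟩
      · push_neg at hcase
        left
        have hdvd : d ∣ c := (PySem.Int.mod_eq_zero_iff_dvd c d).mp hP.1
        exact ⟨⟨by omega, pv_mid_divisor c i d hc hi hdvd (by omega) hhi hcase.2⟩, hP⟩
    · rintro (⟨⟨hlo, hhi⟩, hP⟩ | ⟨⟨hlo, hhi⟩, hP, _⟩)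
      · exact ⟨⟨by omega, by omega⟩, hP⟩
      · exact ⟨⟨hlo, hhi⟩, hP⟩
  have hdisj : Disjoint (pvBand r c (i + 1)) T := by
    rw [Finset.disjoint_left]
    intro d hdB hdT
    rw [hmemB (i+1) d] at hdB
    rw [hmemT d] at hdT
    obtain ⟨⟨hlo, hhi⟩, hP⟩ := hdB
    rcases hdT.2.2 with h | h
    · omega
    · -- d = c / i, a divisor at or above i: then c / d = i, but the band forces i+1 ≤ c / d
      have hdvd : d ∣ c := (PySem.Int.mod_eq_zero_iff_dvd c d).mp hP.1
      have := (pv_top_divisor c i hc hi (h ▸ hdvd) (by omega)).2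
      have hel : i + 1 ≤ c / d := pv_e_le c (i+1) d (by omega) (by omega) hdvd hhi
      rw [h] at hel
      omega
  rw [hunion, Finset.card_union_of_disjoint hdisj, Nat.add_comm]
  congr 1
  -- card T = the contribution of iteration i
  by_cases hm : PySem.Int.mod c i = 0
  · have hidvd : i ∣ c := (PySem.Int.mod_eq_zero_iff_dvd c i).mp hm
    have hdiv_mul : c / i * i = c := Int.ediv_mul_cancel hidvd
    have hdi_dvd : (c / i) ∣ c := ⟨i, hdiv_mul.symm⟩
    have hdi_mod : PySem.Int.mod c (c / i) = 0 := (PySem.Int.mod_eq_zero_iff_dvd c (c / i)).mpr hdi_dvd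
    rw [if_pos hm]
    by_cases heq : c / i = i
    · -- perfect square: the band's ends coincide
      by_cases hir : i ≤ r
      · have : T = {i} := by
          apply Finset.ext; intro d
          rw [hmemT d, Finset.mem_singleton]
          constructor
          · rintro ⟨⟨h1, h2⟩, _, _⟩; omega
          · rintro rfl; exact ⟨⟨le_refl _, hiq⟩, ⟨hm, hir⟩, Or.inl rfl⟩
        rw [this]
        simp [heq, hir]
      · have : T = ∅ := by
          apply Finset.ext; intro d
          rw [hmemT d]
          simp only [Finset.notMem_empty, iff_false]
          rintro ⟨⟨h1, h2⟩, ⟨_, h3⟩, _⟩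
          omega
        rw [this]
        simp [heq, hir]
    · by_cases hir : i ≤ r <;> by_cases hdir : c / i ≤ r
      · have : T = {i, c / i} := by
          apply Finset.ext; intro d
          rw [hmemT d]
          simp only [Finset.mem_insert, Finset.mem_singleton]
          constructor
          · rintro ⟨_, _, h⟩; exact h
          · rintro (rfl | rfl)
            · exact ⟨⟨le_refl _, hiq⟩, ⟨hm, hir⟩, Or.inl rfl⟩
            · exact ⟨⟨hiq, le_refl _⟩, ⟨hdi_mod, hdir⟩, Or.inr rfl⟩
        rw [this, Finset.card_insert_of_notMem (by simp [Ne.symm heq]), Finset.card_singleton]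
        simp [hir, heq, hdir]
      · have : T = {i} := by
          apply Finset.ext; intro d
          rw [hmemT d, Finset.mem_singleton]
          constructor
          · rintro ⟨_, ⟨_, hdr⟩, h | h⟩
            · exact h
            · exfalso; omega
          · rintro rfl; exact ⟨⟨le_refl _, hiq⟩, ⟨hm, hir⟩, Or.inl rfl⟩
        rw [this]
        simp [hir, heq, hdir]
      · have : T = {c / i} := by
          apply Finset.ext; intro d
          rw [hmemT d, Finset.mem_singleton]
          constructor
          · rintro ⟨_, ⟨_, hdr⟩, h | h⟩
            · exfalso; omega
            · exact h
          · rintro rfl; exact ⟨⟨hiq, le_refl _⟩, ⟨hdi_mod, hdir⟩, Or.inr rfl⟩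
        rw [this]
        simp [hir, heq, hdir]
      · have : T = ∅ := by
          apply Finset.ext; intro d
          rw [hmemT d]
          simp only [Finset.notMem_empty, iff_false]
          rintro ⟨_, ⟨_, hdr⟩, h | h⟩ <;> omega
        rw [this]
        simp [hir, heq, hdir]
  · -- i does not divide c: nothing is counted
    rw [if_neg hm]
    have : T = ∅ := by
      apply Finset.ext; intro d
      rw [hmemT d]
      simp only [Finset.notMem_empty, iff_false]
      rintro ⟨⟨hlo, hhi⟩, ⟨hmod, _⟩, h | h⟩
      · exact hm (h ▸ hmod)
      · have hdvd : d ∣ c := (PySem.Int.mod_eq_zero_iff_dvd c d).mp hmod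
        exact hm ((PySem.Int.mod_eq_zero_iff_dvd c i).mpr
          (pv_top_divisor c i hc hi (h ▸ hdvd) (by omega)).1)
    rw [this]
    simp

theorem pvDivLoop_eq (r c i k : Int) (hc : 1 ≤ c) (hi : 1 ≤ i) :
    pvDivLoop r c i k = k + ((pvBand r c i).card : Int) := by
  rw [pvDivLoop]
  by_cases hcond : i * i ≤ c ∧ i ≤ r
  · rw [if_pos hcond, pvDivLoop_eq r c (i+1) _ hc (by omega)]
    have hstep := pvBand_step r c i hc hi hcond.1
    rw [if_pos hcond.2] at hstep
    rw [PySem.Int.floordiv_eq_ediv_of_pos (by omega), hstep]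
    push_cast
    split_ifs <;> ring
  · rw [if_neg hcond]
    rcases Decidable.not_and_iff_or_not.mp hcond with hgt | hgt
    · have hlt : c / i < i := (Int.ediv_lt_iff_lt_mul (by omega)).mpr (by nlinarith [hgt])
      have : Finset.Icc i (c / i) = ∅ := Finset.Icc_eq_empty (by omega)
      simp [pvBand, this]
    · have : pvBand r c i = ∅ := by
        apply Finset.eq_empty_iff_forall_notMem.mpr
        intro d hd
        simp only [pvBand, Finset.mem_filter, Finset.mem_Icc] at hd
        omega
      simp [this]
termination_by (c + 1 - i).toNat
decreasing_by
  rename_i hcond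
  have h1 : i ≤ i * i := le_mul_of_one_le_left (by omega) (by omega)
  have h2 : i ≤ c := le_trans h1 hcond.1
  omega

-- ---- A-side: the toggle loops ----

lemma pvToggle_fold_length (L : List Int) (h : List Bool) :
    (L.foldl pvToggle h).length = h.length := by
  induction L generalizing h with
  | nil => rfl
  | cons x L ih =>
    simp only [List.foldl_cons, ih, pvToggle, PySem.List.length_pySetD]

lemma pvToggle_fold_getD (L : List Int) (h : List Bool)
    (hL : ∀ x ∈ L, 1 ≤ x ∧ x ≤ (h.length : Int)) (j : Nat) :
    (L.foldl pvToggle h).getD j false =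
      xor (h.getD j false) (decide (Odd (L.count ((j : Int) + 1)))) := by
  induction L generalizing h with
  | nil => simp
  | cons x L ih =>
    obtain ⟨hx1, hx2⟩ := hL x List.mem_cons_self
    have hm : x - 1 = (((x - 1).toNat : Nat) : Int) := by omega
    have hmlt : (x - 1).toNat < h.length := by omega
    have hstep : pvToggle h x = h.set (x - 1).toNat (! h.getD (x - 1).toNat false) := by
      unfold pvToggle
      rw [hm, PySem.List.pySetD_natCast, PySem.List.pyGetD_natCast]
      simp
    simp only [List.foldl_cons, hstep]
    rw [ih _ (by
      intro y hy
      have := hL y (List.mem_cons_of_mem _ hy)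
      rwa [List.length_set])]
    rw [List.getD_eq_getElem?_getD, List.getElem?_set, List.count_cons]
    by_cases hjm : (x - 1).toNat = j
    · subst hjm
      have hxj : (x == ((((x - 1).toNat : Nat) : Int) + 1)) = true := by
        simp only [beq_iff_eq]; omega
      rw [if_pos rfl, if_pos hmlt, hxj, if_pos rfl, Option.getD_some]
      have hodd : decide (Odd (L.count ((((x - 1).toNat : Nat) : Int) + 1) + 1)) =
          ! decide (Odd (L.count ((((x - 1).toNat : Nat) : Int) + 1))) := by
        simp only [Nat.odd_add_one, decide_not]
      rw [hodd]
      cases h.getD (x - 1).toNat false <;>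
        cases hd : decide (Odd (L.count ((((x - 1).toNat : Nat) : Int) + 1))) <;> simp
    · have hxj : (x == ((j : Int) + 1)) = false := by
        simp only [beq_eq_false_iff_ne, ne_eq]; omega
      rw [if_neg hjm, hxj, if_neg (by simp)]
      rw [← List.getD_eq_getElem?_getD]
      simp

lemma pv_nodup_pyRange_pos (a b s : Int) (hs : 0 < s) : (PySem.List.pyRange a b s).Nodup := by
  rw [PySem.List.pyRange_of_pos a b hs]
  apply List.Nodup.map ?_ (List.nodup_range)
  intro x y hxy
  have h1 : s * (x : Int) = s * (y : Int) := by linarith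
  have h2 : (x : Int) = (y : Int) := mul_left_cancel₀ (by omega) h1
  exact_mod_cast h2

lemma pvRounds_fold_getD (R : List Int) (nc : Int) (h : List Bool)
    (hlen : h.length = nc.toNat) (hR : ∀ r ∈ R, 1 ≤ r) (j : Nat) :
    ((R.foldl (fun h round => (PySem.List.pyRange round (nc + 1) round).foldl pvToggle h) h).getD j false) =
      xor (h.getD j false)
        (decide (Odd (R.countP (fun r => decide (((j : Int) + 1) ∈ PySem.List.pyRange r (nc + 1) r))))) := by
  induction R generalizing h with
  | nil => simp
  | cons r R ih =>
    have hr : 1 ≤ r := hR r List.mem_cons_self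
    simp only [List.foldl_cons]
    have hmemL : ∀ x ∈ PySem.List.pyRange r (nc + 1) r, 1 ≤ x ∧ x ≤ (h.length : Int) := by
      intro x hx
      have hx' := (PySem.List.mem_pyRange_iff_of_pos (by omega) x).mp hx
      constructor
      · omega
      · rw [hlen]; omega
    rw [ih _ (by rw [pvToggle_fold_length]; exact hlen) (fun r' hr' => hR r' (List.mem_cons_of_mem _ hr'))]
    rw [pvToggle_fold_getD _ h hmemL j, List.countP_cons]
    have hnodup := pv_nodup_pyRange_pos r (nc + 1) r (by omega)
    by_cases hmem : ((j : Int) + 1) ∈ PySem.List.pyRange r (nc + 1) r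
    · rw [List.count_eq_one_of_mem hnodup hmem]
      have h1 : decide (Odd (R.countP (fun r => decide (((j : Int) + 1) ∈ PySem.List.pyRange r (nc + 1) r)) + 1))
          = ! decide (Odd (R.countP (fun r => decide (((j : Int) + 1) ∈ PySem.List.pyRange r (nc + 1) r)))) := by
        simp only [Nat.odd_add_one, decide_not]
      simp only [hmem, decide_true, if_pos, h1]
      cases h.getD j false <;> cases hd : decide (Odd (R.countP (fun r => decide (((j : Int) + 1) ∈ PySem.List.pyRange r (nc + 1) r)))) <;> simp
    · rw [List.count_eq_zero_of_not_mem hmem]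
      simp [hmem]

-- ---- counting bridge ----

lemma pvCountP_range_card (n : Nat) (p : Nat → Bool) :
    (List.range n).countP p = ((Finset.range n).filter (fun k => p k = true)).card := by
  induction n with
  | zero => simp
  | succ n ih =>
    rw [Finset.range_add_one, Finset.filter_insert]
    simp only [List.range_succ, List.countP_append, ih]
    by_cases h : p n = true
    · rw [if_pos h, Finset.card_insert_of_notMem (by simp)]
      simp [h]
    · rw [if_neg h]
      simp [h]

lemma pvCount_divisors (c nr : Int) (hc : 1 ≤ c) :
    (PySem.List.pyRange 1 (nr + 1) 1).countP (fun r => decide (r ∣ c)) = pvDivCard nr c := by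
  rw [PySem.List.pyRange_one, List.countP_map]
  have h1 : (nr + 1 - 1) = nr := by ring
  rw [h1, pvCountP_range_card]
  unfold pvDivCard
  apply Finset.card_bij (i := fun (k : Nat) (_ : _) => 1 + (k : Int))
  · intro k hk
    simp only [Finset.mem_filter, Finset.mem_range, Function.comp, decide_eq_true_eq] at hk
    obtain ⟨hklt, hkdvd⟩ := hk
    simp only [Finset.mem_filter, Finset.mem_Icc]
    refine ⟨⟨by omega, Int.le_of_dvd (by omega) hkdvd⟩, (PySem.Int.mod_eq_zero_iff_dvd c _).mpr hkdvd, by omega⟩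
  · intro a _ b _ hab
    omega
  · intro d hd
    simp only [Finset.mem_filter, Finset.mem_Icc] at hd
    obtain ⟨⟨hd1, hdc⟩, hmod, hdr⟩ := hd
    refine ⟨(d - 1).toNat, ?_, by omega⟩
    simp only [Finset.mem_filter, Finset.mem_range, Function.comp, decide_eq_true_eq]
    constructor
    · omega
    · have he : 1 + ((d - 1).toNat : Int) = d := by omega
      rw [he]
      exact (PySem.Int.mod_eq_zero_iff_dvd c d).mp hmod

-- parity of the A-side round count equals B's count-mod-2 test, per cat
lemma pv_point (nr nc : Int) (c : Int) (hc : 1 ≤ c) (hcn : c ≤ nc) :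
    decide (Odd ((PySem.List.pyRange 1 (nr + 1) 1).countP
        (fun r => decide (c ∈ PySem.List.pyRange r (nc + 1) r)))) =
      decide (PySem.Int.mod (pvDivLoop nr c 1 0) 2 = 1) := by
  have hcong : (PySem.List.pyRange 1 (nr + 1) 1).countP
      (fun r => decide (c ∈ PySem.List.pyRange r (nc + 1) r)) =
      (PySem.List.pyRange 1 (nr + 1) 1).countP (fun r => decide (r ∣ c)) := by
    apply List.countP_congr
    intro r hr
    have hr' := PySem.List.mem_pyRange_one.mp hr
    simp only [decide_eq_true_eq]
    rw [PySem.List.mem_pyRange_iff_of_pos (by omega)]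
    constructor
    · rintro ⟨_, _, hdvd⟩
      have := dvd_add hdvd (dvd_refl r)
      simpa using this
    · intro hdvd
      exact ⟨Int.le_of_dvd (by omega) hdvd, by omega, dvd_sub hdvd (dvd_refl r)⟩
  rw [hcong, pvCount_divisors c nr hc]
  have hloop : pvDivLoop nr c 1 0 = ((pvDivCard nr c : Nat) : Int) := by
    rw [pvDivLoop_eq nr c 1 0 hc (le_refl 1)]
    simp [pvBand, pvDivCard]
  rw [hloop, PySem.Int.mod_eq_emod_of_pos (by norm_num)]
  have : ((pvDivCard nr c : Int) % 2 = 1) ↔ Odd (pvDivCard nr c) := by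
    rw [← Int.odd_iff, Int.odd_coe_nat]
  simp [this]

-- ===== VERDICT (by name: the statement is the Claim_ definition above) =====
theorem cats_with_hats_spec : Claim_equal_cats_with_hats := by
  intro nr nc _
  unfold Spec_cats_with_hats
  show cats_with_hats nr nc = cats_with_hats_alt nr nc
  unfold cats_with_hats cats_with_hats_alt
  rw [PySem.List.foldl_append_if
      (p := fun idx => PySem.List.pyGetD
        ((PySem.List.pyRange 1 (nr + 1) 1).foldl
          (fun h round => (PySem.List.pyRange round (nc + 1) round).foldl pvToggle h)
          (List.replicate nc.toNat false)) idx false)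
      (f := fun idx => idx + 1)]
  rw [PySem.List.foldl_append_ite_eq_filter
      (p := fun cat => PySem.Int.mod (pvDivLoop nr cat 1 0) 2 = 1)]
  simp only [List.nil_append]
  rw [PySem.List.pyRange_one 0 nc, PySem.List.pyRange_one 1 (nc + 1)]
  have h1 : (nc - 0) = nc := by ring
  have h2 : (nc + 1 - 1) = nc := by ring
  rw [h1, h2, List.filter_map, List.filter_map, List.map_map]
  -- both sides are maps of filters of List.range nc.toNat; align them pointwise
  have hfil : List.filter ((fun idx => PySem.List.pyGetD
        ((PySem.List.pyRange 1 (nr + 1) 1).foldl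
          (fun h round => (PySem.List.pyRange round (nc + 1) round).foldl pvToggle h)
          (List.replicate nc.toNat false)) idx false) ∘ (fun k : Nat => (0 : Int) + k))
        (List.range nc.toNat) =
      List.filter ((fun cat => decide (PySem.Int.mod (pvDivLoop nr cat 1 0) 2 = 1)) ∘ (fun k : Nat => (1 : Int) + k))
        (List.range nc.toNat) := by
    apply List.filter_congr
    intro k hk
    have hklt : k < nc.toNat := List.mem_range.mp hk
    simp only [Function.comp, zero_add]
    rw [PySem.List.pyGetD_natCast]
    rw [pvRounds_fold_getD _ nc _ (by simp) (by
      intro r hr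
      exact (PySem.List.mem_pyRange_one.mp hr).1) k]
    rw [List.getD_replicate _ hklt]
    rw [Bool.false_xor]
    simp only [show (1 : Int) + (k : Int) = (k : Int) + 1 from by ring]
    exact pv_point nr nc ((k : Int) + 1) (by omega) (by omega)
  rw [hfil]
  apply List.map_congr_left
  intro k _
  simp only [Function.comp]
  ring
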